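-- pv_equiv track=rewrite | github.com/catinprogress/nxdomain | launcher.py | generate_auth
-- ===== SOURCE A (Python) =====
-- def generate_auth(lines: list):
--     auth_dict = {}
--     for domain in lines: #current domain
--         get_domain = domain.strip("\n").split(",")
--         to_generate = get_domain[0].split(".")
--         tld_domain = to_generate[-2] + "." + to_generate[-1] #tld partial domain
--
--         if auth_dict.get(tld_domain) == None: #tld domain doesn't already exist
--             auth_dict[tld_domain] = [domain.strip("\n")] #key: tld domain, value: list of corresponding auth domains
--         else:
--             ls = auth_dict.get(tld_domain) #add domain to list of existing domains that map to tld domain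
--             ls.append(domain.strip("\n"))
--             auth_dict[tld_domain] = ls
--
--     return auth_dict
-- ===== SOURCE B (Python) =====
-- def _tld(stripped):
--     parts = stripped.split(",")[0].split(".")
--     return parts[-2] + "." + parts[-1]
--
--
-- def generate_auth(lines: list):
--     pairs = [(_tld(line.strip("\n")), line.strip("\n")) for line in lines]
--     order = list(dict.fromkeys(k for k, _ in pairs))
--     return {k: [v for k2, v in pairs if k2 == k] for k in order}
-- ===== Notes on version B (the rewrite author's own statement) =====
-- stated objective: alternative
-- what changed: Instead of one pass mutating a dict (lookup, append, re-insert per line), B builds a (key, stripped-line) pair list once, dedups the keys to fix first-seen order, and assembles each group by a per-key filter comprehension.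
import Mathlib
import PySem

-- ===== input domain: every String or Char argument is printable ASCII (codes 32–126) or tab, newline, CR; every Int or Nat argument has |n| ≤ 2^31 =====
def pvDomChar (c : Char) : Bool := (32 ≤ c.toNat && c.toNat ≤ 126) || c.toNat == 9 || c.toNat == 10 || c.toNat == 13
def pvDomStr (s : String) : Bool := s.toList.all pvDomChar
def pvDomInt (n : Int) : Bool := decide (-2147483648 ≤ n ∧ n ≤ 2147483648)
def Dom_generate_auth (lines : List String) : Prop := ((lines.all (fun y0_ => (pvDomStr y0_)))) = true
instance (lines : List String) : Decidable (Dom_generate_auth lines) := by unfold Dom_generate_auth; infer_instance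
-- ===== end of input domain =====

-- B replaces A's single pass of dict mutation with a pair list, a key dedup and a per-key filter
-- (objective: alternative decomposition, similar cost).

-- s.split(sep) for a nonempty literal sep (split? is none only for sep = "", so the default is never taken)
def pvSplit (s sep : String) : List String := (PySem.Str.split? s sep).getD [s]

-- ===== PORT A =====
def generate_auth (lines : List String) : List (String × List String) :=
  (lines.foldl (fun auth_dict domain =>
    let get_domain := pvSplit (PySem.Str.stripChars domain "\n") ","
    let to_generate := pvSplit (PySem.List.pyGetD get_domain 0 "") "."
    let tld_domain := PySem.List.pyGetD to_generate (-2) "" ++ "." ++ PySem.List.pyGetD to_generate (-1) ""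
    match auth_dict.get? tld_domain with
    | none => auth_dict.insert tld_domain [PySem.Str.stripChars domain "\n"]
    | some ls => auth_dict.insert tld_domain (ls ++ [PySem.Str.stripChars domain "\n"])
    ) (PySem.Dict.empty : PySem.Dict String (List String))).items

-- ===== PORT B =====
def pvTld (stripped : String) : String :=
  let parts := pvSplit (PySem.List.pyGetD (pvSplit stripped ",") 0 "") "."
  PySem.List.pyGetD parts (-2) "" ++ "." ++ PySem.List.pyGetD parts (-1) ""

def generate_auth_alt (lines : List String) : List (String × List String) :=
  let pairs := lines.map (fun line =>
    (pvTld (PySem.Str.stripChars line "\n"), PySem.Str.stripChars line "\n"))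
  let order := PySem.List.dedup (pairs.map (fun p => p.1))
  order.map (fun k => (k, (pairs.filter (fun p => p.1 == k)).map (fun p => p.2)))

-- ===== PRECONDITION & SPEC =====
-- Pre_ excludes exactly the inputs on which the Python A raises IndexError: a line whose first
-- comma-field (after stripping newlines) splits on "." into fewer than two parts.
def Pre_generate_auth (lines : List String) : Prop :=
  ∀ l ∈ lines,
    2 ≤ (pvSplit (PySem.List.pyGetD (pvSplit (PySem.Str.stripChars l "\n") ",") 0 "") ".").length
instance (lines : List String) : Decidable (Pre_generate_auth lines) := by
  unfold Pre_generate_auth; infer_instance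

def pvWitness_generate_auth : List String := ["a.b.com,1", "c.com", "d.b.com"]

def Spec_generate_auth (lines : List String) (out : List (String × List String)) : Prop := out = generate_auth_alt lines
instance (lines : List String) (out : List (String × List String)) : Decidable (Spec_generate_auth lines out) := by unfold Spec_generate_auth; infer_instance

-- ===== CLAIM (what is proved, stated in full; the proofs are below) =====
def Claim_equal_generate_auth : Prop := ∀ (lines : List String), Dom_generate_auth lines → Pre_generate_auth lines → Spec_generate_auth lines (generate_auth lines)

-- ===== LEMMAS AND PROOFS =====

-- A's branch on get? is exactly Python's d[k] = d.get(k, []) + [v]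
theorem pvStepA_eq_modify (d : PySem.Dict String (List String)) (k v : String) :
    (match d.get? k with
      | none => d.insert k [v]
      | some ls => d.insert k (ls ++ [v]))
    = d.modify k [] (fun x => x ++ [v]) := by
  unfold PySem.Dict.modify
  cases h : d.get? k with
  | none => simp [PySem.Dict.getD_eq_get?_getD, h]
  | some ls => simp [PySem.Dict.getD_eq_get?_getD, h]

-- the dict-building fold, characterised as dedup-of-keys with per-key filtered values
theorem pvBuild_items (pairs : List (String × String)) :
    (pairs.foldl (fun d p =>
      match d.get? p.1 with
      | none => d.insert p.1 [p.2]
      | some ls => d.insert p.1 (ls ++ [p.2]))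
      (PySem.Dict.empty : PySem.Dict String (List String))).items
    = (PySem.List.dedup (pairs.map (fun p => p.1))).map
        (fun k => (k, (pairs.filter (fun p => p.1 == k)).map (fun p => p.2))) := by
  have hfold : (pairs.foldl (fun d p =>
      match d.get? p.1 with
      | none => d.insert p.1 [p.2]
      | some ls => d.insert p.1 (ls ++ [p.2]))
      (PySem.Dict.empty : PySem.Dict String (List String)))
    = pairs.foldl (fun d p => d.modify p.1 [] (fun x => x ++ [p.2]))
        (PySem.Dict.empty : PySem.Dict String (List String)) := by
    apply PySem.List.foldl_congr_mem
    intro d p _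
    exact pvStepA_eq_modify d p.1 p.2
  rw [hfold]
  set D := pairs.foldl (fun d p => d.modify p.1 [] (fun x => x ++ [p.2]))
      (PySem.Dict.empty : PySem.Dict String (List String)) with hD
  have hnodup : D.keys.Nodup := by
    rw [hD]
    exact PySem.Dict.nodup_keys_foldl_modify_key pairs (fun p => p.1) []
      (fun d p => fun x => x ++ [p.2]) _ (by simp [PySem.Dict.keys_empty])
  have hkeys : D.keys = PySem.List.dedup (pairs.map (fun p => p.1)) := by
    rw [hD, PySem.Dict.keys_foldl_modify_key pairs (fun p => p.1) []
      (fun d p => fun x => x ++ [p.2]), PySem.List.dedup_eq_ofList]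
    rfl
  have hget : ∀ k, D.getD k [] = (pairs.filter (fun p => p.1 == k)).map (fun p => p.2) := by
    intro k
    rw [hD, PySem.Dict.getD_foldl_modify_append, PySem.Dict.getD_empty]
    simp
  rw [PySem.Dict.items_eq_map_keys D hnodup [], hkeys]
  exact List.map_congr_left (fun k _ => by rw [hget k])

-- ===== VERDICT (by name: the statement is the Claim_ definition above) =====
theorem generate_auth_spec : Claim_equal_generate_auth := by
  intro lines _ _
  unfold Spec_generate_auth generate_auth generate_auth_alt
  have h := pvBuild_items (lines.map (fun line =>
    (pvTld (PySem.Str.stripChars line "\n"), PySem.Str.stripChars line "\n")))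
  rw [List.foldl_map] at h
  exact h
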